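-- pv_equiv track=rewrite | github.com/pypi-data/pypi-mirror-114 | packages/git-outlier/git-outlier-0.0.2.tar.gz/git-outlier-0.0.2/git_outlier/git_outlier.py | get_diagram_output
-- ===== SOURCE A (Python) =====
-- def get_diagram_output(
--     points_to_plot, outliers_to_plot, max_xval, max_yval, x_axis, y_axis
-- ):
--     output = ""
--     output = output + y_axis + "\n"
--     for y_val in range(max_yval, -1, -1):
--         output = output + "|"
--         if points_to_plot[y_val] or outliers_to_plot[y_val] is not None:
--             for x_val in range(0, max_xval + 1, 1):
--                 if (
--                     outliers_to_plot[y_val] is not None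
--                     and x_val in outliers_to_plot[y_val]
--                 ):
--                     output = output + "O"
--                 elif (
--                     points_to_plot[y_val] is not None and x_val in points_to_plot[y_val]
--                 ):
--                     output = output + "X"
--
--                 else:
--                     output = output + " "
--         output = output + "\n"
--     for x_val in range(0, max_xval + 1, 1):
--         output = output + "-"
--     output = output + x_axis
--     return output
-- ===== SOURCE B (Python) =====
-- def get_diagram_output(
--     points_to_plot, outliers_to_plot, max_xval, max_yval, x_axis, y_axis
-- ):
--     width = max_xval + 1
--     lines = [y_axis]
--     for y_val in range(max_yval, -1, -1):
--         pts = points_to_plot[y_val]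
--         outs = outliers_to_plot[y_val]
--         if pts or outs is not None:
--             row = [" "] * width
--             for v in pts or ():
--                 if 0 <= v <= max_xval:
--                     row[v] = "X"
--             for v in outs or ():
--                 if 0 <= v <= max_xval:
--                     row[v] = "O"
--             lines.append("|" + "".join(row))
--         else:
--             lines.append("|")
--     return "\n".join(lines) + "\n" + "-" * width + x_axis
-- ===== Notes on version B (the rewrite author's own statement) =====
-- stated objective: alternative
-- what changed: B builds each row as a mutable character buffer and scatters the sparse point/outlier x-positions into it (outliers written last so they win), collecting rows in a list joined once at the end, instead of A's per-cell scan that tests every x-column for membership in both lists and concatenates the output string character by character.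
import Mathlib
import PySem

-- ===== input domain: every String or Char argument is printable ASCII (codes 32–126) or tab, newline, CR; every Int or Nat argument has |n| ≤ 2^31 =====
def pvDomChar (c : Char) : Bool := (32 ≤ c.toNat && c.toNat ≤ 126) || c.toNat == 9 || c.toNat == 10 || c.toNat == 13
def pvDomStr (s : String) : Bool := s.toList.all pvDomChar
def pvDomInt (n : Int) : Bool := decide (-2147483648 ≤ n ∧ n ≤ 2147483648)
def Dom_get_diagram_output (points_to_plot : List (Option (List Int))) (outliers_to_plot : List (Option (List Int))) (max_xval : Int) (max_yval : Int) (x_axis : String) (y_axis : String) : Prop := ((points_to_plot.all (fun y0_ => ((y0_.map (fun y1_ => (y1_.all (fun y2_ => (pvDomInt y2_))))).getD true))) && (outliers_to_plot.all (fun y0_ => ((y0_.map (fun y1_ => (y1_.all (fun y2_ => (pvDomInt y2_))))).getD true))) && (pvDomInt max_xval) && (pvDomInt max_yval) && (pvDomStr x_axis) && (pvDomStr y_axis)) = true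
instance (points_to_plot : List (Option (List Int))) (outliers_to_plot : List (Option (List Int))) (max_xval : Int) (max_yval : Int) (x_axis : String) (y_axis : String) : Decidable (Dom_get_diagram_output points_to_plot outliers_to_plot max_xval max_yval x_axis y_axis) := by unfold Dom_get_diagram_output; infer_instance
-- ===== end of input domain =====

-- ===== PORT A =====
-- B renders each row by scattering the sparse point/outlier positions into a character
-- buffer instead of A's per-cell membership scan; return values proved equal on Pre_.

-- inner loop of A: 'for x_val in range(0, max_xval + 1, 1): ...' appending one char per column
def pvRowA (p o : Option (List Int)) (max_xval : Int) (out : List Char) : List Char :=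
  (PySem.List.pyRange 0 (max_xval + 1) 1).foldl
    (fun out x =>
      if o ≠ none ∧ x ∈ o.getD [] then out ++ ['O']
      else if p ≠ none ∧ x ∈ p.getD [] then out ++ ['X']
      else out ++ [' ']) out

-- one iteration of A's outer loop body ('|', optional scan of the row, newline)
def pvLineA (points_to_plot outliers_to_plot : List (Option (List Int))) (max_xval : Int)
    (out : List Char) (y_val : Int) : List Char :=
  (if ((PySem.List.pyGet? points_to_plot y_val).getD none ≠ none ∧
        (PySem.List.pyGet? points_to_plot y_val).getD none ≠ some ([] : List Int)) ∨
      (PySem.List.pyGet? outliers_to_plot y_val).getD none ≠ none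
   then pvRowA ((PySem.List.pyGet? points_to_plot y_val).getD none)
          ((PySem.List.pyGet? outliers_to_plot y_val).getD none) max_xval (out ++ ['|'])
   else out ++ ['|']) ++ ['\n']

def get_diagram_output (points_to_plot : List (Option (List Int))) (outliers_to_plot : List (Option (List Int))) (max_xval : Int) (max_yval : Int) (x_axis : String) (y_axis : String) : String :=
  String.ofList
    ((PySem.List.pyRange 0 (max_xval + 1) 1).foldl (fun out _ => out ++ ['-'])
      ((PySem.List.pyRange max_yval (-1) (-1)).foldl
        (pvLineA points_to_plot outliers_to_plot max_xval)
        ([] ++ y_axis.toList ++ ['\n']))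
     ++ x_axis.toList)

-- ===== PORT B =====
-- 'for v in vs: if 0 <= v <= max_xval: row[v] = c'
def pvMark (max_xval : Int) (c : Char) (row : List Char) (vs : List Int) : List Char :=
  vs.foldl (fun r v => if 0 ≤ v ∧ v ≤ max_xval then r.set v.toNat c else r) row

-- one iteration of B's loop body: append the rendered line to `lines`
def pvLineB (points_to_plot outliers_to_plot : List (Option (List Int))) (max_xval : Int)
    (lines : List (List Char)) (y_val : Int) : List (List Char) :=
  if ((PySem.List.pyGet? points_to_plot y_val).getD none ≠ none ∧
       (PySem.List.pyGet? points_to_plot y_val).getD none ≠ some ([] : List Int)) ∨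
     (PySem.List.pyGet? outliers_to_plot y_val).getD none ≠ none
  then lines ++ [['|'] ++
    pvMark max_xval 'O'
      (pvMark max_xval 'X' (List.replicate (max_xval + 1).toNat ' ')
        (((PySem.List.pyGet? points_to_plot y_val).getD none).getD []))
      (((PySem.List.pyGet? outliers_to_plot y_val).getD none).getD [])]
  else lines ++ [['|']]

def get_diagram_output_alt (points_to_plot : List (Option (List Int))) (outliers_to_plot : List (Option (List Int))) (max_xval : Int) (max_yval : Int) (x_axis : String) (y_axis : String) : String :=
  String.ofList
    (PySem.Chars.join ['\n']
      ((PySem.List.pyRange max_yval (-1) (-1)).foldl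
        (pvLineB points_to_plot outliers_to_plot max_xval) [y_axis.toList])
     ++ ['\n'] ++ List.replicate (max_xval + 1).toNat '-' ++ x_axis.toList)

-- ===== PRECONDITION & SPEC =====
-- Pre_ excludes exactly the inputs where A raises IndexError: a non-negative max_yval
-- with points_to_plot or outliers_to_plot shorter than max_yval + 1.
def Pre_get_diagram_output (points_to_plot : List (Option (List Int))) (outliers_to_plot : List (Option (List Int))) (max_xval : Int) (max_yval : Int) (x_axis : String) (y_axis : String) : Prop :=
  0 ≤ max_yval → (max_yval < (points_to_plot.length : Int) ∧ max_yval < (outliers_to_plot.length : Int))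
instance (points_to_plot : List (Option (List Int))) (outliers_to_plot : List (Option (List Int))) (max_xval : Int) (max_yval : Int) (x_axis : String) (y_axis : String) : Decidable (Pre_get_diagram_output points_to_plot outliers_to_plot max_xval max_yval x_axis y_axis) := by unfold Pre_get_diagram_output; infer_instance

def pvWitness_get_diagram_output : List (Option (List Int)) × List (Option (List Int)) × Int × Int × String × String :=
  ([some [1]], [none], 2, 0, "x", "y")

def Spec_get_diagram_output (points_to_plot : List (Option (List Int))) (outliers_to_plot : List (Option (List Int))) (max_xval : Int) (max_yval : Int) (x_axis : String) (y_axis : String) (out : String) : Prop := out = get_diagram_output_alt points_to_plot outliers_to_plot max_xval max_yval x_axis y_axis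
instance (points_to_plot : List (Option (List Int))) (outliers_to_plot : List (Option (List Int))) (max_xval : Int) (max_yval : Int) (x_axis : String) (y_axis : String) (out : String) : Decidable (Spec_get_diagram_output points_to_plot outliers_to_plot max_xval max_yval x_axis y_axis out) := by unfold Spec_get_diagram_output; infer_instance

-- ===== CLAIM (what is proved, stated in full; the proofs are below) =====
def Claim_equal_get_diagram_output : Prop := ∀ (points_to_plot : List (Option (List Int))) (outliers_to_plot : List (Option (List Int))) (max_xval : Int) (max_yval : Int) (x_axis : String) (y_axis : String), Dom_get_diagram_output points_to_plot outliers_to_plot max_xval max_yval x_axis y_axis → Pre_get_diagram_output points_to_plot outliers_to_plot max_xval max_yval x_axis y_axis → Spec_get_diagram_output points_to_plot outliers_to_plot max_xval max_yval x_axis y_axis (get_diagram_output points_to_plot outliers_to_plot max_xval max_yval x_axis y_axis)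

-- ===== LEMMAS AND PROOFS =====


theorem pvMark_length (max_xval : Int) (c : Char) (vs : List Int) (row : List Char) :
    (pvMark max_xval c row vs).length = row.length := by
  induction vs generalizing row with
  | nil => rfl
  | cons v vs ih =>
      simp only [pvMark, List.foldl_cons] at *
      rw [ih]
      split <;> simp

theorem pvMark_getElem? (max_xval : Int) (c : Char) (vs : List Int) (row : List Char)
    (i : Nat) (hi : i < row.length) (hx : (i : Int) ≤ max_xval) :
    (pvMark max_xval c row vs)[i]? = if (i : Int) ∈ vs then some c else row[i]? := by
  induction vs generalizing row with
  | nil => simp [pvMark]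
  | cons v vs ih =>
      have hstep : i < (if 0 ≤ v ∧ v ≤ max_xval then row.set v.toNat c else row).length := by
        split <;> simpa using hi
      have h := ih (if 0 ≤ v ∧ v ≤ max_xval then row.set v.toNat c else row) hstep
      simp only [pvMark, List.foldl_cons] at h ⊢
      rw [h]
      by_cases hm : (i : Int) ∈ vs
      · simp [hm]
      · by_cases hv : (i : Int) = v
        · have hc : (0 ≤ v ∧ v ≤ max_xval) := ⟨by omega, by omega⟩
          rw [if_neg hm, if_pos hc, List.getElem?_set]
          have h1 : v.toNat = i := by omega
          simp [h1, hi, List.mem_cons, hv]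
        · have hnc : ¬ ((i : Int) ∈ (v :: vs)) := by
            simp [List.mem_cons, hv, hm]
          rw [if_neg hm, if_neg hnc]
          split
          · rw [List.getElem?_set]
            rw [if_neg (by omega)]
          · rfl

-- the character A's scan writes at column x
def pvCellChar (p o : Option (List Int)) (x : Int) : Char :=
  if o ≠ none ∧ x ∈ o.getD [] then 'O'
  else if p ≠ none ∧ x ∈ p.getD [] then 'X'
  else ' '

theorem pvRowA_eq_append (p o : Option (List Int)) :
    ∀ (l : List Int) (out : List Char),
      l.foldl (fun out x =>
        if o ≠ none ∧ x ∈ o.getD [] then out ++ ['O']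
        else if p ≠ none ∧ x ∈ p.getD [] then out ++ ['X']
        else out ++ [' ']) out = out ++ l.map (pvCellChar p o) := by
  intro l
  induction l with
  | nil => simp
  | cons x l ih =>
      intro out
      simp only [List.foldl_cons, List.map_cons, ih, pvCellChar]
      split_ifs <;> simp

theorem pvRow_eq (p o : Option (List Int)) (max_xval : Int) :
    ((PySem.List.pyRange 0 (max_xval + 1) 1).map (pvCellChar p o))
      = pvMark max_xval 'O'
          (pvMark max_xval 'X' (List.replicate (max_xval + 1).toNat ' ') (p.getD []))
          (o.getD []) := by
  have hlenX : (pvMark max_xval 'X' (List.replicate (max_xval + 1).toNat ' ') (p.getD [])).length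
      = (max_xval + 1).toNat := by
    have := pvMark_length max_xval 'X' (p.getD []) (List.replicate (max_xval + 1).toNat ' ')
    simpa using this
  apply List.ext_getElem?
  intro i
  by_cases hi : i < (max_xval + 1).toNat
  · have hx : (i : Int) ≤ max_xval := by omega
    rw [pvMark_getElem? _ _ _ _ i (by rw [hlenX]; exact hi) hx,
        pvMark_getElem? _ _ _ _ i (by simpa using hi) hx]
    rw [List.getElem?_eq_getElem (by simpa [PySem.List.length_pyRange_one] using hi)]
    rw [List.getElem_map, PySem.List.getElem_pyRange_one]
    simp only [List.getElem?_replicate, if_pos hi, pvCellChar, zero_add]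
    rcases o with _ | ol <;> rcases p with _ | pl <;> split_ifs <;> simp_all
  · rw [List.getElem?_eq_none (by simpa [PySem.List.length_pyRange_one] using hi),
        List.getElem?_eq_none (by rw [pvMark_length, hlenX]; omega)]

-- join with '\n' of a nonempty list, appending one more line
theorem pvJoin_snoc (x : List Char) :
    ∀ (l : List (List Char)) (a : List Char),
      PySem.Chars.join ['\n'] ((a :: l) ++ [x])
        = PySem.Chars.join ['\n'] (a :: l) ++ ['\n'] ++ x := by
  intro l
  induction l with
  | nil =>
      intro a
      simp [PySem.Chars.join_cons_cons, PySem.Chars.join_singleton]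
  | cons b l ih =>
      intro a
      have h := ih b
      simp only [List.cons_append] at h ⊢
      rw [PySem.Chars.join_cons_cons, h, PySem.Chars.join_cons_cons]
      simp

theorem pvLine_eq (pts outs : List (Option (List Int))) (mx : Int)
    (a : List Char) (ls : List (List Char)) (y : Int) :
    pvLineA pts outs mx (PySem.Chars.join ['\n'] (a :: ls) ++ ['\n']) y
      = PySem.Chars.join ['\n'] (pvLineB pts outs mx (a :: ls) y) ++ ['\n'] := by
  by_cases hg : ((PySem.List.pyGet? pts y).getD none ≠ none ∧
      (PySem.List.pyGet? pts y).getD none ≠ some ([] : List Int)) ∨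
      (PySem.List.pyGet? outs y).getD none ≠ none
  · simp only [pvLineA, pvLineB, if_pos hg]
    rw [pvRowA, pvRowA_eq_append, pvRow_eq, pvJoin_snoc]
    simp
  · simp only [pvLineA, pvLineB, if_neg hg]
    rw [pvJoin_snoc]

theorem pvOuter (pts outs : List (Option (List Int))) (mx : Int) :
    ∀ (ys : List Int) (a : List Char) (ls : List (List Char)),
      ys.foldl (pvLineA pts outs mx) (PySem.Chars.join ['\n'] (a :: ls) ++ ['\n'])
        = PySem.Chars.join ['\n'] (ys.foldl (pvLineB pts outs mx) (a :: ls)) ++ ['\n'] := by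
  intro ys
  induction ys with
  | nil => intro a ls; rfl
  | cons y ys ih =>
      intro a ls
      obtain ⟨r, hr⟩ : ∃ r, ∀ lines, pvLineB pts outs mx lines y = lines ++ [r] := by
        unfold pvLineB
        split
        · exact ⟨_, fun _ => rfl⟩
        · exact ⟨_, fun _ => rfl⟩
      simp only [List.foldl_cons]
      rw [pvLine_eq pts outs mx a ls y, hr,
          show (a :: ls) ++ [r] = a :: (ls ++ [r]) from rfl, ih]

theorem pvDashes (l : List Int) : ∀ (out : List Char),
    l.foldl (fun out _ => out ++ ['-']) out = out ++ List.replicate l.length '-' := by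
  induction l with
  | nil => simp
  | cons x l ih =>
      intro out
      simp only [List.foldl_cons, ih, List.length_cons]
      simp [List.replicate_succ]

-- ===== VERDICT (by name: the statement is the Claim_ definition above) =====
theorem get_diagram_output_spec : Claim_equal_get_diagram_output := by
  intro pts outs mx my xa ya _ _
  unfold Spec_get_diagram_output get_diagram_output get_diagram_output_alt
  rw [show ([] : List Char) ++ ya.toList ++ ['\n']
        = PySem.Chars.join ['\n'] (ya.toList :: []) ++ ['\n'] from by
      simp [PySem.Chars.join_singleton]]
  rw [pvOuter, pvDashes, PySem.List.length_pyRange_one]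
  simp
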